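-- pv_equiv track=rewrite | github.com/urtepuod/cell_clustering_api | app/support_hdbscan.py | kill_same_slice_duplicates
-- ===== SOURCE A (Python) =====
-- def kill_same_slice_duplicates(labels, zs):
--     seen = set()
--     for i, (lbl, z) in enumerate(zip(labels, zs)):
--         if lbl == -1:
--             continue
--         key = (lbl, z)
--         if key in seen:
--             labels[i] = -1          # duplicate → noise, NOT a new cluster
--         else:
--             seen.add(key)
--     return labels
-- ===== SOURCE B (Python) =====
-- def kill_same_slice_duplicates(labels, zs):
--     groups = {}
--     for i, (lbl, z) in enumerate(zip(labels, zs)):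
--         if lbl != -1:
--             groups.setdefault((lbl, z), []).append(i)
--     for idxs in groups.values():
--         for i in idxs[1:]:
--             labels[i] = -1
--     return labels
-- ===== Notes on version B (the rewrite author's own statement) =====
-- stated objective: alternative
-- what changed: Replaces the online seen-set pass that marks a duplicate the moment it is re-seen with a two-phase grouping: first build a dict mapping each non-noise (label, z) key to the list of indices where it occurs, then mark every index after the first of each group as noise.
import Mathlib
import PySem

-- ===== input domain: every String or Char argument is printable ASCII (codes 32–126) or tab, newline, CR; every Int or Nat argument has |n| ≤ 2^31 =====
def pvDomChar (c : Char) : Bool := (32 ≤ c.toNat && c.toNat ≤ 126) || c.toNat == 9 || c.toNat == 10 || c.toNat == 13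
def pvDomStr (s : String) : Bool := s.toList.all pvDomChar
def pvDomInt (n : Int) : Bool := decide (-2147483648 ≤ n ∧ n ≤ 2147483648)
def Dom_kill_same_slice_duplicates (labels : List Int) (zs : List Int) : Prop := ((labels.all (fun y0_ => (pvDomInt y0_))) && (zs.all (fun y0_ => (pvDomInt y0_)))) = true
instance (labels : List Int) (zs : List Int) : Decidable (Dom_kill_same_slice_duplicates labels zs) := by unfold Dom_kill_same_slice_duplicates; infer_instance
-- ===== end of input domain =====

-- B replaces A's online seen-set pass with a two-phase grouping (dict key → index list, then
-- mark every index after the first of each group); equivalence is about the RETURN value (both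
-- Pythons also mutate `labels` in place to exactly that value).

-- ===== PORT A =====
-- enumerate(zip(labels, zs)): indices are the nonnegative in-range ints 0,1,2,…, so a Nat
-- counter with List.set for `labels[i] = -1` is exact here (no negative/out-of-range index).
def pvEnum (n : Nat) : List (Int × Int) → List (Nat × (Int × Int))
  | [] => []
  | p :: rest => (n, p) :: pvEnum (n + 1) rest

def pvKillGo : List (Nat × (Int × Int)) → PySem.Set (Int × Int) → List Int → List Int
  | [], _, lab => lab
  | (i, (lbl, z)) :: rest, seen, lab =>
    if lbl == -1 then pvKillGo rest seen lab
    else if PySem.Set.contains seen (lbl, z) then pvKillGo rest seen (lab.set i (-1))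
    else pvKillGo rest (PySem.Set.add seen (lbl, z)) lab

def kill_same_slice_duplicates (labels : List Int) (zs : List Int) : List Int :=
  pvKillGo (pvEnum 0 (labels.zip zs)) PySem.Set.empty labels

-- ===== PORT B =====
-- groups.setdefault((lbl, z), []).append(i)  is  d[k] = d.get(k, []) + [i], i.e. Dict.modify.
def pvBuild (e : List (Nat × (Int × Int))) : PySem.Dict (Int × Int) (List Nat) :=
  e.foldl (fun d p => if p.2.1 == -1 then d else d.modify p.2 [] (· ++ [p.1])) PySem.Dict.empty

def kill_same_slice_duplicates_alt (labels : List Int) (zs : List Int) : List Int :=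
  ((pvBuild (pvEnum 0 (labels.zip zs))).values).foldl
    (fun lab idxs => (idxs.drop 1).foldl (fun lab i => lab.set i (-1)) lab) labels

-- ===== PRECONDITION & SPEC =====
def Spec_kill_same_slice_duplicates (labels : List Int) (zs : List Int) (out : List Int) : Prop := out = kill_same_slice_duplicates_alt labels zs
instance (labels : List Int) (zs : List Int) (out : List Int) : Decidable (Spec_kill_same_slice_duplicates labels zs out) := by unfold Spec_kill_same_slice_duplicates; infer_instance

-- ===== CLAIM (what is proved, stated in full; the proofs are below) =====
def Claim_equal_kill_same_slice_duplicates : Prop := ∀ (labels : List Int) (zs : List Int), Dom_kill_same_slice_duplicates labels zs → Spec_kill_same_slice_duplicates labels zs (kill_same_slice_duplicates labels zs)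

-- ===== LEMMAS AND PROOFS =====

/-- Apply `l[j] = -1` at every index in `S`, left to right. -/
def pvSetAll (S : List Nat) (lab : List Int) : List Int :=
  S.foldl (fun l j => l.set j (-1)) lab

/-- The indices A's loop overwrites, in scan order. -/
def pvDupScan : List (Nat × (Int × Int)) → PySem.Set (Int × Int) → List Nat
  | [], _ => []
  | (i, (lbl, z)) :: rest, seen =>
    if lbl == -1 then pvDupScan rest seen
    else if PySem.Set.contains seen (lbl, z) then i :: pvDupScan rest seen
    else pvDupScan rest (PySem.Set.add seen (lbl, z))

/-- The duplicate predicate both programs realise: position `j` holds a non-noise pair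
that already occurred strictly earlier. -/
def pvDup (pairs : List (Int × Int)) (j : Nat) : Prop :=
  ∃ h : j < pairs.length, (pairs[j]).1 ≠ -1 ∧ pairs[j] ∈ pairs.take j

lemma pvKillGo_eq_setAll (e : List (Nat × (Int × Int))) :
    ∀ seen lab, pvKillGo e seen lab = pvSetAll (pvDupScan e seen) lab := by
  induction e with
  | nil => intro seen lab; rfl
  | cons p rest ih =>
    intro seen lab
    obtain ⟨i, lbl, z⟩ := p
    simp only [pvKillGo, pvDupScan]
    split
    · exact ih _ _
    · split
      · simp [pvSetAll, ih]
      · exact ih _ _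

lemma mem_pvEnum (pairs : List (Int × Int)) :
    ∀ (n : Nat) (q : Nat × (Int × Int)),
      q ∈ pvEnum n pairs ↔ ∃ (k : Nat) (h : k < pairs.length), q = (n + k, pairs[k]) := by
  induction pairs with
  | nil => simp [pvEnum]
  | cons p rest ih =>
    intro n q
    simp only [pvEnum, List.mem_cons, ih]
    constructor
    · rintro (rfl | ⟨k, h, rfl⟩)
      · exact ⟨0, by simp, by simp⟩
      · exact ⟨k + 1, by simpa using h, by simp [Nat.add_assoc, Nat.add_comm 1 k]⟩
    · rintro ⟨k, h, rfl⟩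
      cases k with
      | zero => left; simp
      | succ k => right; exact ⟨k, by simpa using h, by simp [Nat.add_assoc, Nat.add_comm 1 k]⟩

lemma mem_take_iff (pairs : List (Int × Int)) (j : Nat) (p : Int × Int) :
    p ∈ pairs.take j ↔ ∃ (i : Nat) (h : i < pairs.length), i < j ∧ pairs[i] = p := by
  constructor
  · intro hp
    obtain ⟨i, hi, hget⟩ := List.getElem_of_mem hp
    have hi' : i < pairs.length := lt_of_lt_of_le hi (by simp)
    refine ⟨i, hi', lt_of_lt_of_le hi (by simp), ?_⟩
    rw [← hget, List.getElem_take]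
  · rintro ⟨i, h, hij, rfl⟩
    have hlen : i < (pairs.take j).length := by simp; omega
    have := List.getElem_mem hlen
    rwa [List.getElem_take] at this

lemma mem_pvDupScan (pairs : List (Int × Int)) :
    ∀ (n : Nat) (seen : PySem.Set (Int × Int)) (j : Nat),
      j ∈ pvDupScan (pvEnum n pairs) seen ↔
        ∃ (k : Nat) (h : k < pairs.length), j = n + k ∧ (pairs[k]).1 ≠ -1 ∧
          (pairs[k] ∈ seen ∨ pairs[k] ∈ pairs.take k) := by
  induction pairs with
  | nil => simp [pvEnum, pvDupScan]
  | cons p rest ih =>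
    intro n seen j
    obtain ⟨lbl, z⟩ := p
    simp only [pvEnum, pvDupScan]
    split
    · rename_i hnoise
      rw [ih]
      constructor
      · rintro ⟨k, h, rfl, hne, hmem⟩
        have h' : k + 1 < ((lbl, z) :: rest).length := by simpa using h
        refine ⟨k + 1, h', by omega, by simpa using hne, ?_⟩
        simp only [List.getElem_cons_succ, List.take_succ_cons, List.mem_cons]
        rcases hmem with hm | hm
        · left; exact hm
        · right; right; exact hm
      · rintro ⟨k, h, rfl, hne, hmem⟩
        cases k with
        | zero => exact absurd (by simpa using hnoise) (by simpa using hne)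
        | succ k =>
          have h' : k < rest.length := by simpa using h
          refine ⟨k, h', by omega, by simpa using hne, ?_⟩
          simp only [List.getElem_cons_succ, List.take_succ_cons, List.mem_cons] at hmem
          rcases hmem with hm | hm | hm
          · left; exact hm
          · exfalso
            apply (by simpa using hne : rest[k].1 ≠ -1)
            simp [hm, (by simpa using hnoise : lbl = (-1 : Int))]
          · right; exact hm
    · rename_i hnn
      split
      · rename_i hseen
        have hseen' : (lbl, z) ∈ seen := (PySem.Set.contains_iff seen (lbl, z)).mp hseen
        simp only [List.mem_cons, ih]
        constructor
        · rintro (rfl | ⟨k, h, rfl, hne, hmem⟩)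
          · exact ⟨0, by simp, by simp, by simpa using hnn, Or.inl (by simpa using hseen')⟩
          · have h' : k + 1 < ((lbl, z) :: rest).length := by simpa using h
            refine ⟨k + 1, h', by omega, by simpa using hne, ?_⟩
            simp only [List.getElem_cons_succ, List.take_succ_cons, List.mem_cons]
            rcases hmem with hm | hm
            · left; exact hm
            · right; right; exact hm
        · rintro ⟨k, h, rfl, hne, hmem⟩
          cases k with
          | zero => left; omega
          | succ k =>
            right
            have h' : k < rest.length := by simpa using h
            refine ⟨k, h', by omega, by simpa using hne, ?_⟩
            simp only [List.getElem_cons_succ, List.take_succ_cons, List.mem_cons] at hmem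
            rcases hmem with hm | hm | hm
            · left; exact hm
            · left; rw [hm]; exact hseen'
            · right; exact hm
      · rename_i hseen
        have hseen' : (lbl, z) ∉ seen := fun hm =>
          hseen ((PySem.Set.contains_iff seen (lbl, z)).mpr hm)
        rw [ih]
        constructor
        · rintro ⟨k, h, rfl, hne, hmem⟩
          have h' : k + 1 < ((lbl, z) :: rest).length := by simpa using h
          refine ⟨k + 1, h', by omega, by simpa using hne, ?_⟩
          simp only [List.getElem_cons_succ, List.take_succ_cons, List.mem_cons]
          rcases hmem with hm | hm
          · rw [PySem.Set.mem_add] at hm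
            rcases hm with hm | hm
            · left; exact hm
            · right; left; exact hm
          · right; right; exact hm
        · rintro ⟨k, h, rfl, hne, hmem⟩
          cases k with
          | zero =>
            exfalso
            simp only [List.getElem_cons_zero, List.take_zero] at hmem
            rcases hmem with hm | hm
            · exact hseen' hm
            · simp at hm
          | succ k =>
            have h' : k < rest.length := by simpa using h
            refine ⟨k, h', by omega, by simpa using hne, ?_⟩
            simp only [List.getElem_cons_succ, List.take_succ_cons, List.mem_cons] at hmem
            rcases hmem with hm | hm | hm
            · left; rw [PySem.Set.mem_add]; left; exact hm
            · left; rw [PySem.Set.mem_add]; right; exact hm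
            · right; exact hm

lemma mem_dupScan_iff_pvDup (pairs : List (Int × Int)) (j : Nat) :
    j ∈ pvDupScan (pvEnum 0 pairs) PySem.Set.empty ↔ pvDup pairs j := by
  rw [mem_pvDupScan]
  constructor
  · rintro ⟨k, h, rfl, hne, hmem⟩
    rcases hmem with hm | hm
    · simp [PySem.Set.empty] at hm
    · exact ⟨by simpa using h, by simpa using hne, by simpa using hm⟩
  · rintro ⟨h, hne, hmem⟩
    exact ⟨j, h, by simp, hne, Or.inr hmem⟩

lemma getElem?_pvSetAll (S : List Nat) :
    ∀ (lab : List Int) (i : Nat),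
      (pvSetAll S lab)[i]? = if i ∈ S ∧ i < lab.length then some (-1) else lab[i]? := by
  induction S with
  | nil => intro lab i; simp [pvSetAll]
  | cons j S ih =>
    intro lab i
    have hstep : pvSetAll (j :: S) lab = pvSetAll S (lab.set j (-1)) := by
      simp [pvSetAll]
    rw [hstep, ih, List.length_set]
    by_cases hlt : i < lab.length
    · by_cases hiS : i ∈ S
      · simp [hiS, hlt]
      · by_cases hij : j = i
        · subst hij
          simp [hiS, hlt]
        · have hij' : i ≠ j := fun h => hij h.symm
          simp only [List.mem_cons, hiS, or_false, hij', hlt, and_true]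
          rw [List.getElem?_set, if_neg hij]
    · have h1 : lab[i]? = none := by
        rw [List.getElem?_eq_none]; omega
      have h2 : (lab.set j (-1))[i]? = none := by
        rw [List.getElem?_eq_none]; simp; omega
      simp only [hlt, and_false, if_false, h1, h2]

lemma pvSetAll_eq_of_mem_iff (S T : List Nat) (h : ∀ j, j ∈ S ↔ j ∈ T) (lab : List Int) :
    pvSetAll S lab = pvSetAll T lab := by
  apply List.ext_getElem?
  intro i
  rw [getElem?_pvSetAll, getElem?_pvSetAll]
  exact if_congr (and_congr_left (fun _ => h i)) rfl rfl

lemma nested_foldl_eq_setAll (vals : List (List Nat)) :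
    ∀ lab, vals.foldl (fun lab idxs => (idxs.drop 1).foldl (fun lab i => lab.set i (-1)) lab) lab
      = pvSetAll (vals.flatMap (·.drop 1)) lab := by
  induction vals with
  | nil => intro lab; rfl
  | cons v vs ih =>
    intro lab
    simp only [List.foldl_cons, List.flatMap_cons, pvSetAll, List.foldl_append]
    exact ih _

lemma foldl_if_skip {α β : Type} (l : List α) (c : α → Bool) (g : β → α → β) :
    ∀ (d : β), l.foldl (fun d p => if c p then d else g d p) d = (l.filter (fun p => !c p)).foldl g d := by
  induction l with
  | nil => intro d; rfl
  | cons p l ih =>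
    intro d
    by_cases hc : c p <;> simp [hc, ih]

/-- The items B's grouping loop actually inserts: (key, index), noise filtered out. -/
def pvItems (e : List (Nat × (Int × Int))) : List ((Int × Int) × Nat) :=
  (e.filter (fun p => !(p.2.1 == -1))).map (fun p => (p.2, p.1))

lemma pvBuild_eq_foldl_items (e : List (Nat × (Int × Int))) :
    pvBuild e = (pvItems e).foldl (fun d q => d.modify q.1 [] (· ++ [q.2])) PySem.Dict.empty := by
  rw [pvBuild, pvItems, foldl_if_skip, List.foldl_map]

lemma pvBuild_getD (e : List (Nat × (Int × Int))) (k : Int × Int) :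
    (pvBuild e).getD k [] = ((pvItems e).filter (fun q => q.1 == k)).map (·.2) := by
  rw [pvBuild_eq_foldl_items, PySem.Dict.getD_foldl_modify_append]
  simp

lemma pvBuild_keys_nodup (e : List (Nat × (Int × Int))) : (pvBuild e).keys.Nodup := by
  rw [pvBuild_eq_foldl_items]
  exact PySem.Dict.nodup_keys_foldl_modify_key _ _ _ _ _ PySem.Dict.nodup_keys_empty

lemma mem_pvBuild_keys (e : List (Nat × (Int × Int))) (k : Int × Int) :
    k ∈ (pvBuild e).keys ↔ k ∈ (pvItems e).map (·.1) := by
  rw [pvBuild_eq_foldl_items, PySem.Dict.keys_foldl_modify_key]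
  simp [PySem.Set.mem_update, PySem.Dict.keys_empty]

lemma pairwise_fst_pvEnum (pairs : List (Int × Int)) :
    ∀ n, (pvEnum n pairs).Pairwise (fun a b => a.1 < b.1) := by
  induction pairs with
  | nil => intro n; simp [pvEnum]
  | cons p rest ih =>
    intro n
    refine List.Pairwise.cons ?_ (ih (n + 1))
    intro q hq
    obtain ⟨k, h, rfl⟩ := (mem_pvEnum rest (n + 1) q).mp hq
    simp; omega

lemma pairwise_lt_group (e : List (Nat × (Int × Int)))
    (he : e.Pairwise (fun a b => a.1 < b.1)) (k : Int × Int) :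
    (((pvItems e).filter (fun q => q.1 == k)).map (·.2)).Pairwise (· < ·) := by
  rw [List.pairwise_map]
  apply List.Pairwise.filter
  rw [pvItems, List.pairwise_map]
  apply List.Pairwise.filter
  exact he

lemma mem_drop_one_of_pairwise_lt (l : List Nat) (hl : l.Pairwise (· < ·)) (a : Nat) :
    a ∈ l.drop 1 ↔ a ∈ l ∧ ∃ b ∈ l, b < a := by
  cases l with
  | nil => simp
  | cons h t =>
    rw [List.pairwise_cons] at hl
    simp only [List.drop_one, List.tail_cons, List.mem_cons]
    constructor
    · intro ha
      exact ⟨Or.inr ha, h, Or.inl rfl, hl.1 a ha⟩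
    · rintro ⟨ha, b, hb, hba⟩
      rcases ha with rfl | ha
      · exfalso
        rcases hb with rfl | hb
        · omega
        · exact absurd (hl.1 b hb) (by omega)
      · exact ha

lemma mem_group_iff (pairs : List (Int × Int)) (k : Int × Int) (j : Nat) :
    j ∈ (((pvItems (pvEnum 0 pairs)).filter (fun q => q.1 == k)).map (·.2)) ↔
      ∃ h : j < pairs.length, pairs[j] = k ∧ k.1 ≠ -1 := by
  constructor
  · intro hj
    obtain ⟨q, hq, hq2⟩ := List.mem_map.mp hj
    obtain ⟨hq', hqk⟩ := List.mem_filter.mp hq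
    rw [pvItems] at hq'
    obtain ⟨ip, hip, hswap⟩ := List.mem_map.mp hq'
    obtain ⟨hipE, hnn⟩ := List.mem_filter.mp hip
    obtain ⟨m, hm, rfl⟩ := (mem_pvEnum pairs 0 ip).mp hipE
    cases hswap
    have hj' : j = m := by simpa using hq2.symm
    subst hj'
    have hk : pairs[j] = k := by simpa using hqk
    refine ⟨hm, hk, ?_⟩
    rw [← hk]
    simpa using hnn
  · rintro ⟨h, hk, hnn⟩
    apply List.mem_map.mpr
    refine ⟨(k, j), List.mem_filter.mpr ⟨?_, by simp⟩, rfl⟩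
    rw [pvItems]
    apply List.mem_map.mpr
    refine ⟨(j, k), List.mem_filter.mpr ⟨(mem_pvEnum pairs 0 (j, k)).mpr ⟨j, h, by simp [hk]⟩, ?_⟩, rfl⟩
    simp only [Bool.not_eq_eq_eq_not, Bool.not_true, beq_eq_false_iff_ne, ne_eq]
    exact hnn

lemma mem_Bdups_iff_pvDup (pairs : List (Int × Int)) (j : Nat) :
    j ∈ ((pvBuild (pvEnum 0 pairs)).values).flatMap (·.drop 1) ↔ pvDup pairs j := by
  rw [List.mem_flatMap]
  have hvals : (pvBuild (pvEnum 0 pairs)).values =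
      (pvBuild (pvEnum 0 pairs)).keys.map (fun k => (pvBuild (pvEnum 0 pairs)).getD k []) :=
    PySem.Dict.values_eq_map_keys _ (pvBuild_keys_nodup _) []
  constructor
  · rintro ⟨v, hv, hjv⟩
    rw [hvals, List.mem_map] at hv
    obtain ⟨k, hk, rfl⟩ := hv
    rw [pvBuild_getD] at hjv
    rw [mem_drop_one_of_pairwise_lt _ (pairwise_lt_group _ (pairwise_fst_pvEnum pairs 0) k)] at hjv
    obtain ⟨hj, b, hb, hba⟩ := hjv
    obtain ⟨h, hjk, hnn⟩ := (mem_group_iff pairs k j).mp hj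
    obtain ⟨hb', hbk, -⟩ := (mem_group_iff pairs k b).mp hb
    refine ⟨h, by simp [hjk, hnn], ?_⟩
    rw [mem_take_iff]
    exact ⟨b, hb', hba, by rw [hbk, hjk]⟩
  · rintro ⟨h, hnn, hmem⟩
    set k := pairs[j] with hk
    have hjg : j ∈ (((pvItems (pvEnum 0 pairs)).filter (fun q => q.1 == k)).map (·.2)) :=
      (mem_group_iff pairs k j).mpr ⟨h, rfl, hnn⟩
    obtain ⟨b, hb', hbj, hbk⟩ := (mem_take_iff pairs j k).mp hmem
    have hbg : b ∈ (((pvItems (pvEnum 0 pairs)).filter (fun q => q.1 == k)).map (·.2)) :=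
      (mem_group_iff pairs k b).mpr ⟨hb', hbk, hnn⟩
    refine ⟨(pvBuild (pvEnum 0 pairs)).getD k [], ?_, ?_⟩
    · rw [hvals]
      apply List.mem_map.mpr
      refine ⟨k, ?_, rfl⟩
      rw [mem_pvBuild_keys]
      obtain ⟨q, hq, -⟩ := List.mem_map.mp hjg
      have hq' := List.mem_filter.mp hq
      exact List.mem_map.mpr ⟨q, hq'.1, beq_iff_eq.mp hq'.2⟩
    · rw [pvBuild_getD]
      rw [mem_drop_one_of_pairwise_lt _ (pairwise_lt_group _ (pairwise_fst_pvEnum pairs 0) k)]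
      exact ⟨hjg, b, hbg, hbj⟩

-- ===== VERDICT (by name: the statement is the Claim_ definition above) =====
theorem kill_same_slice_duplicates_spec : Claim_equal_kill_same_slice_duplicates := by
  intro labels zs _
  unfold Spec_kill_same_slice_duplicates kill_same_slice_duplicates kill_same_slice_duplicates_alt
  rw [pvKillGo_eq_setAll, nested_foldl_eq_setAll]
  apply pvSetAll_eq_of_mem_iff
  intro j
  rw [mem_dupScan_iff_pvDup, mem_Bdups_iff_pvDup]
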